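-- pv_equiv track=rewrite | github.com/f100001e/puppetmaster | mitm/ua_sniffer.py | host_in_bypass
-- ===== SOURCE A (Python) =====
-- BYPASS_SUFFIXES = {
--     "google.com",
--     "cloudflare.com",
--     "mitm.it",
--     "spotify.com",
--     "spclient.wg.spotify.com",
--     "guc3-spclient.spotify.com",
-- }
--
-- BYPASS_HOSTS = {"localhost", "127.0.0.1", "::1"}
--
-- def host_in_bypass(host: str) -> bool:
--     h = (host or "").lower().rstrip(".")
--     if h in BYPASS_HOSTS:
--         return True
--     for s in BYPASS_SUFFIXES:
--         s = s.lower()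
--         if h == s or h.endswith("." + s):
--             return True
--     return False
-- ===== SOURCE B (Python) =====
-- BYPASS_SUFFIXES = {
--     "google.com",
--     "cloudflare.com",
--     "mitm.it",
--     "spotify.com",
--     "spclient.wg.spotify.com",
--     "guc3-spclient.spotify.com",
-- }
--
-- BYPASS_HOSTS = {"localhost", "127.0.0.1", "::1"}
--
-- _SUFFIX_SET = {s.lower() for s in BYPASS_SUFFIXES}
--
--
-- def host_in_bypass(host: str) -> bool:
--     h = (host or "").lower().rstrip(".")
--     if h in BYPASS_HOSTS or h in _SUFFIX_SET:
--         return True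
--     # check the tail after each '.' (dot-boundary suffixes) against the set
--     return any(c == "." and h[i + 1:] in _SUFFIX_SET for i, c in enumerate(h))
-- ===== Notes on version B (the rewrite author's own statement) =====
-- stated objective: alternative
-- what changed: B precomputes a lowercased suffix set and scans the normalized host's characters once, testing the tail after each dot (and the whole host) by set membership, instead of A's loop over the suffix set doing equality/endswith per suffix.
import Mathlib
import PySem

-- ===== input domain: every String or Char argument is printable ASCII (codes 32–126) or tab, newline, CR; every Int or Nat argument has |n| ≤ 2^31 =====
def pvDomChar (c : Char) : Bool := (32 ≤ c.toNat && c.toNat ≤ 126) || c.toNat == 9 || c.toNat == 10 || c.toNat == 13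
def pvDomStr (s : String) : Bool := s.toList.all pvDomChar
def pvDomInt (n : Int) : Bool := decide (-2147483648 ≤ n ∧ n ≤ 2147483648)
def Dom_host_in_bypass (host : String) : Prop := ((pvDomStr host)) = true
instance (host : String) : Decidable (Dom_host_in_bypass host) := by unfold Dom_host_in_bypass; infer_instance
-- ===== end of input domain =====

-- B scans the host's characters once, looking each dot-boundary tail up in a set,
-- instead of A's loop over the suffix set doing endswith; objective: alternative.

-- shared normalization, the identical first line of A and B: h = (host or "").lower().rstrip(".")
-- rstrip(".") is ported by hand (drop trailing '.' characters), exact;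
-- (host or "") is transliterated as the empty-string truthiness test Python performs.
def pvRstripDot (s : String) : String :=
  String.ofList ((s.toList.reverse.dropWhile (fun c => c == '.')).reverse)

def pvNormHost (host : String) : String :=
  pvRstripDot (PySem.Str.lower (if host == "" then "" else host))

-- ===== PORT A =====
def pvSuffixList : List String :=
  ["google.com", "cloudflare.com", "mitm.it", "spotify.com",
   "spclient.wg.spotify.com", "guc3-spclient.spotify.com"]

def pvBypassSuffixes : PySem.Set String := PySem.Set.ofList pvSuffixList

def pvBypassHosts : PySem.Set String := PySem.Set.ofList ["localhost", "127.0.0.1", "::1"]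

-- the 'for s in BYPASS_SUFFIXES' loop with its early return (result is order-independent)
def pvLoopA (h : String) : List String → Bool
  | [] => false
  | s :: rest =>
      let s' := PySem.Str.lower s
      if h == s' || PySem.Str.endswith h ("." ++ s') then true else pvLoopA h rest

def host_in_bypass (host : String) : Bool :=
  let h := pvNormHost host
  if PySem.Set.contains pvBypassHosts h then true
  else pvLoopA h pvBypassSuffixes

-- ===== PORT B =====
def pvBypassHostsB : PySem.Set String := PySem.Set.ofList ["localhost", "127.0.0.1", "::1"]

-- _SUFFIX_SET = {s.lower() for s in BYPASS_SUFFIXES}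
def pvSuffixSetB : PySem.Set String :=
  PySem.Set.ofList
    ((["google.com", "cloudflare.com", "mitm.it", "spotify.com",
       "spclient.wg.spotify.com", "guc3-spclient.spotify.com"] : List String).map PySem.Str.lower)

def host_in_bypass_alt (host : String) : Bool :=
  let h := pvNormHost host
  if PySem.Set.contains pvBypassHostsB h || PySem.Set.contains pvSuffixSetB h then true
  else
    (PySem.List.enumerate h.toList).any
      (fun p => p.2 == '.' && PySem.Set.contains pvSuffixSetB (PySem.Str.slice h (some (p.1 + 1)) none))

-- ===== PRECONDITION & SPEC =====
def Spec_host_in_bypass (host : String) (out : Bool) : Prop := out = host_in_bypass_alt host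
instance (host : String) (out : Bool) : Decidable (Spec_host_in_bypass host out) := by unfold Spec_host_in_bypass; infer_instance

-- ===== CLAIM (what is proved, stated in full; the proofs are below) =====
def Claim_equal_host_in_bypass : Prop := ∀ (host : String), Dom_host_in_bypass host → Spec_host_in_bypass host (host_in_bypass host)

-- ===== LEMMAS AND PROOFS =====

theorem pvStrToList_inj {s t : String} (h : s.toList = t.toList) : s = t := by
  have h2 := congrArg String.ofList h
  simpa using h2

theorem pvLoopA_eq_any (h : String) (L : List String) :
    pvLoopA h L = L.any (fun s => h == PySem.Str.lower s || PySem.Str.endswith h ("." ++ PySem.Str.lower s)) := by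
  induction L with
  | nil => rfl
  | cons s rest ih =>
      simp only [pvLoopA, List.any_cons]
      cases hC : (h == PySem.Str.lower s || PySem.Str.endswith h ("." ++ PySem.Str.lower s)) with
      | true => simp
      | false => simp [ih]

theorem pvEndswith_dot_iff (h t : String) :
    PySem.Str.endswith h ("." ++ t) = true ↔ ('.' :: t.toList) <:+ h.toList := by
  have hlist : ("." ++ t).toList = '.' :: t.toList := by simp
  rw [PySem.Str.endswith_eq, PySem.Chars.endswith_iff, hlist]

-- a dotted suffix of cs is exactly a tail of cs right after a '.'
theorem pvDot_suffix_iff (s cs : List Char) :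
    ('.' :: s <:+ cs) ↔ ∃ k : ℕ, ∃ hk : k < cs.length, cs[k] = '.' ∧ cs.drop (k + 1) = s := by
  constructor
  · intro hsuf
    have hd := List.suffix_iff_eq_drop.mp hsuf
    set k := cs.length - ('.' :: s).length with hkdef
    have hk : k < cs.length := by
      by_contra hge
      rw [not_lt] at hge
      have hnil : cs.drop k = [] := List.drop_eq_nil_of_le hge
      rw [hnil] at hd
      exact absurd hd (by simp)
    have hcons := List.drop_eq_getElem_cons hk
    rw [hcons] at hd
    obtain ⟨h1, h2⟩ := List.cons.injEq _ _ _ _ ▸ hd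
    exact ⟨k, hk, h1.symm, h2.symm⟩
  · rintro ⟨k, hk, hdot, hdrop⟩
    have hcons : cs.drop k = '.' :: s := by
      rw [List.drop_eq_getElem_cons hk, hdot, hdrop]
    rw [← hcons]
    exact List.drop_suffix k cs

theorem pvContains_map_lower_iff (L : List String) (x : String) :
    (PySem.Set.ofList (L.map PySem.Str.lower)).contains x = true ↔ ∃ s ∈ L, PySem.Str.lower s = x := by
  rw [PySem.Set.contains_iff, PySem.Set.mem_ofList, List.mem_map]

theorem pvSlice_toList (h : String) (k : ℕ) :
    (PySem.Str.slice h (some ((0 : ℤ) + k + 1)) none).toList = h.toList.drop (k + 1) := by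
  rw [PySem.Str.toList_slice, PySem.Chars.slice_eq_listSlice]
  rw [PySem.List.slice_from _ (by omega : (0 : ℤ) ≤ 0 + (k : ℤ) + 1)]
  congr 1
  omega

theorem pvLoopA_eq_alt (h : String) (L : List String) :
    pvLoopA h L =
      ((PySem.Set.ofList (L.map PySem.Str.lower)).contains h ||
        (PySem.List.enumerate h.toList).any
          (fun p => p.2 == '.' && (PySem.Set.ofList (L.map PySem.Str.lower)).contains
              (PySem.Str.slice h (some (p.1 + 1)) none))) := by
  rw [Bool.eq_iff_iff, pvLoopA_eq_any]
  constructor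
  · intro hA
    obtain ⟨s, hsL, hs⟩ := List.any_eq_true.mp hA
    rw [Bool.or_eq_true] at hs
    rcases hs with heq | hend
    · rw [Bool.or_eq_true]
      left
      exact (pvContains_map_lower_iff L h).mpr ⟨s, hsL, (beq_iff_eq.mp heq).symm⟩
    · have hsuf := (pvEndswith_dot_iff h (PySem.Str.lower s)).mp hend
      obtain ⟨k, hk, hdot, hdrop⟩ := (pvDot_suffix_iff _ _).mp hsuf
      rw [Bool.or_eq_true]
      right
      refine List.any_eq_true.mpr ⟨((0 : ℤ) + k, h.toList[k]), ?_, ?_⟩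
      · exact (PySem.List.mem_enumerate_iff _ _ _).mpr ⟨k, hk, rfl⟩
      · rw [Bool.and_eq_true]
        refine ⟨beq_iff_eq.mpr hdot, ?_⟩
        refine (pvContains_map_lower_iff L _).mpr ⟨s, hsL, ?_⟩
        apply pvStrToList_inj
        rw [pvSlice_toList h k]
        exact hdrop.symm
  · intro hB
    rcases Bool.or_eq_true_iff.mp hB with hc | hany
    · obtain ⟨s, hsL, hls⟩ := (pvContains_map_lower_iff L h).mp hc
      refine List.any_eq_true.mpr ⟨s, hsL, ?_⟩
      rw [Bool.or_eq_true]
      left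
      exact beq_iff_eq.mpr hls.symm
    · obtain ⟨p, hpmem, hp⟩ := List.any_eq_true.mp hany
      obtain ⟨k, hk, rfl⟩ := (PySem.List.mem_enumerate_iff _ _ _).mp hpmem
      rw [Bool.and_eq_true] at hp
      obtain ⟨hdot, hcont⟩ := hp
      obtain ⟨s, hsL, hls⟩ := (pvContains_map_lower_iff L _).mp hcont
      refine List.any_eq_true.mpr ⟨s, hsL, ?_⟩
      rw [Bool.or_eq_true]
      right
      apply (pvEndswith_dot_iff h (PySem.Str.lower s)).mpr
      apply (pvDot_suffix_iff _ _).mpr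
      refine ⟨k, hk, beq_iff_eq.mp hdot, ?_⟩
      have htl := congrArg String.toList hls
      rw [pvSlice_toList h k] at htl
      exact htl.symm

-- ===== VERDICT (by name: the statement is the Claim_ definition above) =====
theorem host_in_bypass_spec : Claim_equal_host_in_bypass := by
  intro host _
  show host_in_bypass host = host_in_bypass_alt host
  simp only [host_in_bypass, host_in_bypass_alt]
  generalize pvNormHost host = h
  rw [show pvBypassHostsB = pvBypassHosts from rfl,
      show pvSuffixSetB = PySem.Set.ofList (pvSuffixList.map PySem.Str.lower) from rfl,
      show pvBypassSuffixes = pvSuffixList from rfl,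
      pvLoopA_eq_alt h pvSuffixList]
  cases hc1 : PySem.Set.contains pvBypassHosts h <;>
    cases hc2 : PySem.Set.contains (PySem.Set.ofList (pvSuffixList.map PySem.Str.lower)) h <;>
      simp
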